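-- pv_equiv track=rewrite | github.com/MinTreesLearn/ML | Codeforces Submissions/1295/C/194338215.py | f
-- ===== SOURCE A (Python) =====
-- from collections import defaultdict
-- import bisect
--
-- def f(s,t):
--
--     A=defaultdict(list)
--
--     S=set(s)
--
--     T=set(t)
--
--     for i in T:
--
--         if i not in S:
--
--             return -1
--
--     n=len(s)
--
--     for i in range(n):
--
--         A[s[i]].append(i)
--
--     i=0
--
--     j=0
--
--     U=len(t)
--
--     ans=1
--
--     while j<U:
--
--         c=t[j]
--
--         k=bisect.bisect_left(A[c],i)
--
--         if k>=len(A[c]):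
--
--             i=0
--
--             ans+=1
--
--         else:
--
--             j+=1
--
--             i=(A[c][k]+1)
--
--     return ans
-- ===== SOURCE B (Python) =====
-- def f(s, t):
--     if set(t) - set(s):
--         return -1
--     ans = 1
--     i = 0
--     for c in t:
--         k = s.find(c, i)
--         if k == -1:
--             ans += 1
--             k = s.find(c)
--         i = k + 1
--     return ans
-- ===== Notes on version B (the rewrite author's own statement) =====
-- stated objective: faster
-- what changed: Replaces A's defaultdict of per-character position lists plus bisect_left per step by a single pass over t that advances a start index with str.find (falling back to s.find(c) when the pass wraps), with a set-subset precheck.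
import Mathlib
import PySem

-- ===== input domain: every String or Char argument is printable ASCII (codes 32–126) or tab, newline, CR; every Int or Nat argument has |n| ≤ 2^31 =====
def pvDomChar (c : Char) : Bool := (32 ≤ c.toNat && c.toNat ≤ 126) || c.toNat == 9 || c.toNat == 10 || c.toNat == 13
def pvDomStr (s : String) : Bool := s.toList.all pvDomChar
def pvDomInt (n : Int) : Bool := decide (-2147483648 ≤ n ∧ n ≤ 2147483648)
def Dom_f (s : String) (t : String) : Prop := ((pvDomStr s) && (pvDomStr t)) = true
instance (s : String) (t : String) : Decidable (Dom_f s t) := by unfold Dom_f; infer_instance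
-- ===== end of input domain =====

-- B replaces A's per-character occurrence lists + binary search by a single pass over t using
-- str.find with a start index; same return value on every input (A raises nowhere).

-- ===== PORT A =====
-- A's dict: A[c] = list of positions of c in s, from 'for i in range(n): A[s[i]].append(i)'
def pvDictA (cs : List Char) : PySem.Dict Char (List Int) :=
  (PySem.List.pyRange 0 cs.length 1).foldl
    (fun d i => d.insert (PySem.List.pyGetD cs i ' ')
      (d.getD (PySem.List.pyGetD cs i ' ') [] ++ [i]))
    PySem.Dict.empty

-- A's 'while j < U' loop (state i, j, ans); fuel 2*len(t)+1 always suffices once every char of t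
-- occurs in s: each step either advances j, or resets i to 0 after which the next step advances j.
def fLoop (tcs : List Char) (d : PySem.Dict Char (List Int)) :
    Nat → Int → Int → Int → Int
  | 0, _, _, ans => ans
  | fuel+1, i, j, ans =>
    if j < (tcs.length : Int) then
      let c := PySem.List.pyGetD tcs j ' '
      let l := d.getD c []
      let k := PySem.List.bisectLeft l i
      if l.length ≤ k then fLoop tcs d fuel 0 j (ans + 1)
      else fLoop tcs d fuel (l.getD k 0 + 1) (j + 1) ans
    else ans

def f (s : String) (t : String) : Int :=
  let S := PySem.Set.ofList s.toList
  let T := PySem.Set.ofList t.toList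
  if T.all (fun c => PySem.Set.contains S c) then
    fLoop t.toList (pvDictA s.toList) (2 * t.toList.length + 1) 0 0 1
  else -1

-- ===== PORT B =====
-- one step of B's 'for c in t' loop, state = (ans, i)
def fAltStep (cs : List Char) (st : Int × Int) (c : Char) : Int × Int :=
  let k := PySem.Chars.findFrom cs [c] st.2
  if k = -1 then (st.1 + 1, PySem.Chars.find cs [c] + 1)
  else (st.1, k + 1)

def f_alt (s : String) (t : String) : Int :=
  if PySem.Set.issubset (PySem.Set.ofList t.toList) (PySem.Set.ofList s.toList) then
    (t.toList.foldl (fAltStep s.toList) (1, 0)).1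
  else -1

-- ===== PRECONDITION & SPEC =====
def Spec_f (s : String) (t : String) (out : Int) : Prop := out = f_alt s t
instance (s : String) (t : String) (out : Int) : Decidable (Spec_f s t out) := by unfold Spec_f; infer_instance

-- ===== CLAIM (what is proved, stated in full; the proofs are below) =====
def Claim_equal_f : Prop := ∀ (s : String) (t : String), Dom_f s t → Spec_f s t (f s t)

-- ===== LEMMAS AND PROOFS =====

-- the sorted list of positions of c in cs (as Ints): what A's dict stores under key c
def pvOcc (cs : List Char) (c : Char) : List Int :=
  ((List.range cs.length).filter (fun k => cs.getD k ' ' == c)).map (Nat.cast : Nat → Int)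

lemma pvDictA_aux (cs : List Char) (c : Char) :
    ∀ (n : Nat) (d0 : PySem.Dict Char (List Int)),
      ((((List.range n).map (Nat.cast : Nat → Int)).foldl
        (fun d i => d.insert (PySem.List.pyGetD cs i ' ')
          (d.getD (PySem.List.pyGetD cs i ' ') [] ++ [i])) d0).getD c [])
      = d0.getD c [] ++ ((List.range n).filter (fun k => cs.getD k ' ' == c)).map (Nat.cast : Nat → Int) := by
  intro n
  induction n with
  | zero => simp
  | succ n ih =>
    intro d0
    rw [List.range_succ]
    simp only [List.map_append, List.filter_append, List.foldl_append, List.map_cons,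
      List.map_nil, List.foldl_cons, List.foldl_nil]
    rw [PySem.List.pyGetD_natCast, PySem.Dict.getD_insert]
    by_cases hc : cs.getD n ' ' = c
    · rw [hc, if_pos rfl, ih]
      simp [← List.getD_eq_getElem?_getD, hc]
    · rw [if_neg (Ne.symm hc), ih]
      simp [← List.getD_eq_getElem?_getD, hc]

lemma pvDictA_getD (cs : List Char) (c : Char) :
    (pvDictA cs).getD c [] = pvOcc cs c := by
  unfold pvDictA pvOcc
  rw [PySem.List.pyRange_zero_natCast, pvDictA_aux]
  simp

lemma pvOcc_sorted (cs : List Char) (c : Char) :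
    (pvOcc cs c).Pairwise (· ≤ ·) := by
  unfold pvOcc
  rw [List.pairwise_map]
  refine ((List.pairwise_lt_range).filter _).imp ?_
  intro a b h; exact_mod_cast h.le

lemma pvOcc_mem (cs : List Char) (c : Char) (x : Int) :
    x ∈ pvOcc cs c ↔ ∃ k : Nat, k < cs.length ∧ cs.getD k ' ' = c ∧ x = (k : Int) := by
  unfold pvOcc
  simp only [List.mem_map, List.mem_filter, List.mem_range, beq_iff_eq]
  constructor
  · rintro ⟨k, ⟨hk, hc⟩, rfl⟩; exact ⟨k, hk, hc, rfl⟩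
  · rintro ⟨k, hk, hc, rfl⟩; exact ⟨k, ⟨hk, hc⟩, rfl⟩

lemma occ_prefix (cs : List Char) (c : Char) (i : Nat) (hi : i < cs.length)
    (hc : cs.getD i ' ' = c) : [c] <+: cs.drop i := by
  refine ⟨cs.drop (i+1), ?_⟩
  rw [List.getD_eq_getElem cs ' ' hi] at hc
  rw [List.drop_eq_getElem_cons hi, hc]
  rfl

lemma prefix_occ (cs : List Char) (c : Char) (i : Nat) (h : [c] <+: cs.drop i) :
    i < cs.length ∧ cs.getD i ' ' = c := by
  obtain ⟨ts, hts⟩ := h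
  have hd : cs.drop i = c :: ts := by simpa using hts.symm
  have hi : i < cs.length := by
    have := congrArg List.length hd; simp at this; omega
  have h0 : cs[i]'hi = c := by
    have h2 := List.drop_eq_getElem_cons hi (l := cs)
    rw [hd] at h2
    exact (List.cons.injEq _ _ _ _ ▸ h2).1.symm
  exact ⟨hi, by rw [List.getD_eq_getElem cs ' ' hi]; exact h0⟩

lemma bisect_miss_iff (cs : List Char) (c : Char) (m : Nat) (hm : m ≤ cs.length) :
    (pvOcc cs c).length ≤ PySem.List.bisectLeft (pvOcc cs c) (m : Int) ↔
      PySem.Chars.findFrom cs [c] (m : Int) = -1 := by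
  obtain ⟨hk1, hk2, hk3⟩ := PySem.List.bisectLeft_spec (pvOcc cs c) (m : Int) (pvOcc_sorted cs c)
  rw [PySem.Chars.findFrom_natCast_eq_neg_one_iff cs [c] m hm, List.singleton_infix_iff]
  constructor
  · intro h hmem
    obtain ⟨j, hj, hidx⟩ := List.mem_drop_iff_getElem.mp hmem
    have hocc : ((m + j : Nat) : Int) ∈ pvOcc cs c := by
      rw [pvOcc_mem]
      exact ⟨m + j, by omega, by rw [List.getD_eq_getElem cs ' ' (by omega)]; simpa using hidx, rfl⟩
    obtain ⟨j', hj', hval⟩ := List.mem_iff_getElem.mp hocc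
    have hlt := hk2 j' hj' (by omega)
    rw [hval] at hlt
    have : (m : Int) + j < m := by exact_mod_cast hlt
    omega
  · intro h
    by_contra hlt
    push_neg at hlt
    have hmem : (pvOcc cs c)[PySem.List.bisectLeft (pvOcc cs c) (m : Int)]'hlt ∈ pvOcc cs c :=
      List.getElem_mem _
    rw [pvOcc_mem] at hmem
    obtain ⟨idx, hidx, hcidx, hval⟩ := hmem
    have hge := hk3 _ hlt (le_refl _)
    rw [hval] at hge
    have hmi : m ≤ idx := by exact_mod_cast hge
    exact h (List.mem_drop_iff_getElem.mpr ⟨idx - m, by omega, by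
      rw [List.getD_eq_getElem cs ' ' (by omega : idx < cs.length)] at hcidx
      have he : m + (idx - m) = idx := by omega
      simp only [he]; exact hcidx⟩)

lemma bisect_hit (cs : List Char) (c : Char) (m : Nat) (hm : m ≤ cs.length)
    (h : PySem.List.bisectLeft (pvOcc cs c) (m : Int) < (pvOcc cs c).length) :
    ∃ m' : Nat, m' < cs.length ∧
      PySem.Chars.findFrom cs [c] (m : Int) = (m' : Int) ∧
      (pvOcc cs c).getD (PySem.List.bisectLeft (pvOcc cs c) (m : Int)) 0 = (m' : Int) := by
  have hne : PySem.Chars.findFrom cs [c] (m : Int) ≠ -1 := by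
    intro hcon
    exact absurd ((bisect_miss_iff cs c m hm).mpr hcon) (by omega)
  obtain ⟨hmr, hpre, hmin⟩ := PySem.Chars.findFrom_natCast_spec cs [c] m hm hne
  obtain ⟨hrl, hcr⟩ := prefix_occ cs c _ hpre
  have hr0 : (0 : Int) ≤ PySem.Chars.findFrom cs [c] (m : Int) := le_trans (by positivity) hmr
  have hmtn : m ≤ (PySem.Chars.findFrom cs [c] (m : Int)).toNat := by omega
  refine ⟨(PySem.Chars.findFrom cs [c] (m : Int)).toNat, hrl, (Int.toNat_of_nonneg hr0).symm, ?_⟩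
  obtain ⟨hk1, hk2, hk3⟩ := PySem.List.bisectLeft_spec (pvOcc cs c) (m : Int) (pvOcc_sorted cs c)
  have hmem : (pvOcc cs c)[PySem.List.bisectLeft (pvOcc cs c) (m : Int)]'h ∈ pvOcc cs c :=
    List.getElem_mem _
  rw [pvOcc_mem] at hmem
  obtain ⟨idx, hidx, hcidx, hval⟩ := hmem
  have hge := hk3 _ h (le_refl _)
  rw [hval] at hge
  have hmi : m ≤ idx := by exact_mod_cast hge
  have h1 : (PySem.Chars.findFrom cs [c] (m : Int)).toNat ≤ idx := by
    by_contra hcon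
    push_neg at hcon
    exact hmin idx hmi (by omega) (occ_prefix cs c idx hidx hcidx)
  have hroc : (((PySem.Chars.findFrom cs [c] (m : Int)).toNat : Nat) : Int) ∈ pvOcc cs c := by
    rw [pvOcc_mem]; exact ⟨_, hrl, hcr, rfl⟩
  obtain ⟨j, hj, hjval⟩ := List.mem_iff_getElem.mp hroc
  have hkj : PySem.List.bisectLeft (pvOcc cs c) (m : Int) ≤ j := by
    by_contra hcon
    push_neg at hcon
    have hx := hk2 j hj hcon
    rw [hjval] at hx
    have : (PySem.Chars.findFrom cs [c] (m : Int)).toNat < m := by exact_mod_cast hx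
    omega
  have h2 : (pvOcc cs c)[PySem.List.bisectLeft (pvOcc cs c) (m : Int)]'h ≤ (pvOcc cs c)[j]'hj := by
    rcases Nat.lt_or_ge (PySem.List.bisectLeft (pvOcc cs c) (m : Int)) j with hlt | hge'
    · exact (List.pairwise_iff_getElem.mp (pvOcc_sorted cs c)) _ _ h hj hlt
    · have hx : PySem.List.bisectLeft (pvOcc cs c) (m : Int) = j := by omega
      simp [hx]
  rw [hval, hjval] at h2
  have h3 : idx = (PySem.Chars.findFrom cs [c] (m : Int)).toNat := by
    have : (idx : Int) ≤ ((PySem.Chars.findFrom cs [c] (m : Int)).toNat : Int) := h2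
    omega
  rw [List.getD_eq_getElem (pvOcc cs c) 0 h, hval, h3]

lemma loop_eq (cs : List Char) (tl : List Char) (H : ∀ c ∈ tl, c ∈ cs) :
    ∀ (pre : List Char) (m : Nat), m ≤ cs.length → ∀ (ans : Int) (fuel : Nat),
      2 * tl.length + 1 ≤ fuel →
      fLoop (pre ++ tl) (pvDictA cs) fuel (m : Int) (pre.length : Int) ans
        = (tl.foldl (fAltStep cs) (ans, (m : Int))).1 := by
  induction tl with
  | nil =>
    intro pre m hm ans fuel hf
    obtain ⟨f', rfl⟩ : ∃ f', fuel = f' + 1 := ⟨fuel - 1, by omega⟩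
    simp [fLoop]
  | cons c rest ih =>
    intro pre m hm ans fuel hf
    obtain ⟨f', rfl⟩ : ∃ f', fuel = f' + 1 := ⟨fuel - 1, by omega⟩
    have Hc : c ∈ cs := H c (by simp)
    have Hrest : ∀ x ∈ rest, x ∈ cs := fun x hx => H x (by simp [hx])
    have hj : ((pre.length : Nat) : Int) < (((pre ++ c :: rest).length : Nat) : Int) := by
      push_cast [List.length_append, List.length_cons]; omega
    have hcget : PySem.List.pyGetD (pre ++ c :: rest) (pre.length : Int) ' ' = c := by
      rw [PySem.List.pyGetD_natCast]; simp [List.getD_eq_getElem?_getD]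
    rw [fLoop]
    simp only [hcget, pvDictA_getD, if_pos hj]
    simp only [List.foldl_cons]
    by_cases hmiss : (pvOcc cs c).length ≤ PySem.List.bisectLeft (pvOcc cs c) (m : Int)
    · -- miss: A resets i to 0 and retries; B's step takes the k = -1 branch
      rw [if_pos hmiss]
      have hfneg : PySem.Chars.findFrom cs [c] (m : Int) = -1 := (bisect_miss_iff cs c m hm).mp hmiss
      have hstep : fAltStep cs (ans, (m : Int)) c = (ans + 1, PySem.Chars.find cs [c] + 1) := by
        simp [fAltStep, hfneg]
      rw [hstep]
      -- second A-step: bisect at 0 hits (c occurs in cs)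
      obtain ⟨f'', rfl⟩ : ∃ f'', f' = f'' + 1 := ⟨f' - 1, by simp at hf; omega⟩
      have hhit0 : PySem.List.bisectLeft (pvOcc cs c) ((0 : Nat) : Int) < (pvOcc cs c).length := by
        rcases Nat.lt_or_ge (PySem.List.bisectLeft (pvOcc cs c) ((0 : Nat) : Int)) (pvOcc cs c).length with h | h
        · exact h
        · exfalso
          have := (bisect_miss_iff cs c 0 (by omega)).mp h
          rw [PySem.Chars.findFrom_natCast_eq_neg_one_iff cs [c] 0 (by omega),
            List.singleton_infix_iff] at this
          simp at this
          exact this Hc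
      obtain ⟨m0, hm0, hf0, hg0⟩ := bisect_hit cs c 0 (by omega) hhit0
      rw [fLoop]
      simp only [hcget, pvDictA_getD, if_pos hj]
      rw [if_neg (by push_cast at hhit0 ⊢; omega), (by push_cast at hg0 ⊢; rw [hg0] : (pvOcc cs c).getD (PySem.List.bisectLeft (pvOcc cs c) (0:Int)) 0 = (m0 : Int))]
      have hfind : PySem.Chars.find cs [c] = (m0 : Int) := by
        rw [← PySem.Chars.findFrom_zero]; push_cast at hf0; exact hf0
      have hpre1 : ((pre.length : Nat) : Int) + 1 = (((pre ++ [c]).length : Nat) : Int) := by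
        push_cast [List.length_append, List.length_cons, List.length_nil]; ring
      have hmc : (m0 : Int) + 1 = (((m0 + 1 : Nat)) : Int) := by push_cast; ring
      rw [hfind, hmc, hpre1, show pre ++ c :: rest = (pre ++ [c]) ++ rest by simp]
      exact ih Hrest (pre ++ [c]) (m0 + 1) (by omega) (ans + 1) f'' (by simp at hf ⊢; omega)
    · -- hit
      rw [if_neg hmiss]
      obtain ⟨m', hm', hfm, hgm⟩ := bisect_hit cs c m hm (by omega)
      have hstep : fAltStep cs (ans, (m : Int)) c = (ans, (m' : Int) + 1) := by
        simp [fAltStep, hfm]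
      rw [hstep, hgm]
      have hpre1 : ((pre.length : Nat) : Int) + 1 = (((pre ++ [c]).length : Nat) : Int) := by
        push_cast [List.length_append, List.length_cons, List.length_nil]; ring
      have hmc : (m' : Int) + 1 = (((m' + 1 : Nat)) : Int) := by push_cast; ring
      rw [hmc, hpre1, show pre ++ c :: rest = (pre ++ [c]) ++ rest by simp]
      exact ih Hrest (pre ++ [c]) (m' + 1) (by omega) ans f' (by simp at hf ⊢; omega)

theorem f_spec_aux (s t : String) : f s t = f_alt s t := by
  unfold f f_alt
  by_cases hsub : PySem.Set.issubset (PySem.Set.ofList t.toList) (PySem.Set.ofList s.toList) = true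
  · have hall : (PySem.Set.ofList t.toList).all
        (fun c => PySem.Set.contains (PySem.Set.ofList s.toList) c) = true := hsub
    rw [if_pos hsub]
    simp only [hall, if_pos]
    have H : ∀ c ∈ t.toList, c ∈ s.toList := by
      intro c hc
      have hmem : c ∈ PySem.Set.ofList t.toList := (PySem.Set.mem_ofList _ _).mpr hc
      have := (List.all_eq_true.mp hall) c hmem
      exact (PySem.Set.mem_ofList _ _).mp (List.contains_iff_mem.mp this)
    have := loop_eq s.toList t.toList H [] 0 (by omega) 1 (2 * t.toList.length + 1) (le_refl _)
    simpa using this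
  · have hall : ¬ ((PySem.Set.ofList t.toList).all
        (fun c => PySem.Set.contains (PySem.Set.ofList s.toList) c) = true) := hsub
    rw [if_neg hsub, if_neg hall]

-- ===== VERDICT (by name: the statement is the Claim_ definition above) =====
theorem f_spec : Claim_equal_f := by
  intro s t _
  unfold Spec_f
  exact f_spec_aux s t
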